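-- pv_equiv track=rewrite | github.com/AliRamberg/ShitScripts | PythonShit/ClientConfig/NET.py | GetCorrectVersion
-- ===== SOURCE A (Python) =====
-- vers = [378389, 378675, 379893, 393295, 394254, 394802, 460798, 461308, 461808]
--
-- def GetCorrectVersion(number):
--     low = 0
--     high = len(vers) - 1
--     while low <= high:
--         mid = int((low + high) / 2)
--         if number >= vers[high]:
--             return high
--         elif number <= vers[low]:
--             return low
--         elif number <= vers[mid]:
--             high -= 1
--         elif number >= vers[mid + 1]:
--             low += 1
--         elif vers[mid] <= number < vers[mid + 1]:
--             return mid
--         else: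
--             return -1
-- ===== SOURCE B (Python) =====
-- vers = [378389, 378675, 379893, 393295, 394254, 394802, 460798, 461308, 461808]
--
-- def GetCorrectVersion(number):
--     n = len(vers)
--     if number >= vers[-1]:
--         return n - 1
--     if number <= vers[0]:
--         return 0
--     lo, hi = 0, n - 2
--     while lo <= hi:
--         mid = (lo + hi) // 2
--         if vers[mid] <= number < vers[mid + 1]:
--             return mid
--         if number < vers[mid]:
--             hi = mid - 1
--         else:
--             lo = mid + 1
--     return -1
-- ===== Notes on version B (the rewrite author's own statement) =====
-- stated objective: alternative
-- what changed: Replaced A's loop that narrows the [low,high] window one index per iteration (high-=1 / low+=1) by a true halving binary search (hi=mid-1 / lo=mid+1) with the two boundary cases returned up front; on the small fixed version table the speed difference is negligible.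
import Mathlib
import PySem

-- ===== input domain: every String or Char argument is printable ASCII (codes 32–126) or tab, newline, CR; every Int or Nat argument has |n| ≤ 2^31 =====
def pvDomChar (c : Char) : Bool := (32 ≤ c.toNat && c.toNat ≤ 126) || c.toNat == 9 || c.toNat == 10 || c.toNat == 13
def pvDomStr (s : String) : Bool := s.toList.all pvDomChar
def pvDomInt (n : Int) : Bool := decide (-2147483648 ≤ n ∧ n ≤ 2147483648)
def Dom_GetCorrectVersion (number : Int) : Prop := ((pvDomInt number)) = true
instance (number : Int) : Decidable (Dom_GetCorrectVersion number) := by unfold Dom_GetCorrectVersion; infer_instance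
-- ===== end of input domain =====

set_option maxHeartbeats 1000000


-- B replaces A's one-index-per-iteration window narrowing by a genuine halving binary search (alternative; same result).

-- ===== PORT A =====
def versA : List Int := [378389, 378675, 379893, 393295, 394254, 394802, 460798, 461308, 461808]

-- vers[i]; the loop keeps 0 ≤ low ≤ high ≤ 8, so the index is always in range and the getD 0 default never fires
def vatA (i : Int) : Int := (PySem.List.pyGet? versA i).getD 0

-- the while loop; mid = int((low+high)/2) ported as floordiv, inlined (exact: low+high ≥ 0 in every reached state)
def goA (number low high : Int) : Int :=
  if _h : low ≤ high then
    if number ≥ vatA high then high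
    else if number ≤ vatA low then low
    else if number ≤ vatA (PySem.Int.floordiv (low + high) 2) then goA number low (high - 1)
    else if number ≥ vatA (PySem.Int.floordiv (low + high) 2 + 1) then goA number (low + 1) high
    else if vatA (PySem.Int.floordiv (low + high) 2) ≤ number ∧ number < vatA (PySem.Int.floordiv (low + high) 2 + 1) then
      PySem.Int.floordiv (low + high) 2
    else -1
  else 0   -- Python falls off the loop returning None; unreachable for int input (low = high forces a return)
termination_by (high - low + 1).toNat
decreasing_by all_goals omega

def GetCorrectVersion (number : Int) : Int := goA number 0 (versA.length - 1)

-- ===== PORT B =====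
def versB : List Int := [378389, 378675, 379893, 393295, 394254, 394802, 460798, 461308, 461808]

def vatB (i : Int) : Int := (PySem.List.pyGet? versB i).getD 0

-- the halving loop, mid = (lo+hi)//2 inlined
def goB (number lo hi : Int) : Int :=
  if _h : lo ≤ hi then
    if vatB (PySem.Int.floordiv (lo + hi) 2) ≤ number ∧ number < vatB (PySem.Int.floordiv (lo + hi) 2 + 1) then
      PySem.Int.floordiv (lo + hi) 2
    else if number < vatB (PySem.Int.floordiv (lo + hi) 2) then goB number lo (PySem.Int.floordiv (lo + hi) 2 - 1)
    else goB number (PySem.Int.floordiv (lo + hi) 2 + 1) hi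
  else -1
termination_by (hi - lo + 1).toNat
decreasing_by all_goals (have := PySem.Int.floordiv_two_mid_bounds _h; omega)

def GetCorrectVersion_alt (number : Int) : Int :=
  if number ≥ vatB (-1) then (versB.length : Int) - 1
  else if number ≤ vatB 0 then 0
  else goB number 0 ((versB.length : Int) - 2)

-- ===== PRECONDITION & SPEC =====
def Spec_GetCorrectVersion (number : Int) (out : Int) : Prop := out = GetCorrectVersion_alt number
instance (number : Int) (out : Int) : Decidable (Spec_GetCorrectVersion number out) := by unfold Spec_GetCorrectVersion; infer_instance

-- ===== CLAIM (what is proved, stated in full; the proofs are below) =====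
def Claim_equal_GetCorrectVersion : Prop := ∀ (number : Int), Dom_GetCorrectVersion number → Spec_GetCorrectVersion number (GetCorrectVersion number)

-- ===== LEMMAS AND PROOFS =====

theorem vatA_eval : vatA (-1) = 461808 ∧ vatA 0 = 378389 ∧ vatA 1 = 378675 ∧ vatA 2 = 379893 ∧
    vatA 3 = 393295 ∧ vatA 4 = 394254 ∧ vatA 5 = 394802 ∧ vatA 6 = 460798 ∧ vatA 7 = 461308 ∧ vatA 8 = 461808 := by
  decide

theorem vatB_eq_vatA (i : Int) : vatB i = vatA i := rfl

-- the table is strictly increasing on indices 0..8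
theorem vatA_mono {i j : Int} (hi : 0 ≤ i) (hij : i < j) (hj : j ≤ 8) : vatA i < vatA j := by
  have hi7 : i ≤ 7 := by omega
  have hj0 : 0 ≤ j := by omega
  interval_cases i <;> interval_cases j <;> decide

theorem vatA_monoLe {i j : Int} (hi : 0 ≤ i) (hij : i ≤ j) (hj : j ≤ 8) : vatA i ≤ vatA j := by
  rcases eq_or_lt_of_le hij with rfl | h
  · exact le_refl _
  · exact le_of_lt (vatA_mono hi h hj)

-- A's loop returns k when the bucket index k lies in [low, high]
theorem goA_correct (n k : Int) (hk0 : 0 ≤ k) (hk7 : k ≤ 7)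
    (hbk : vatA k ≤ n) (hbk1 : n < vatA (k + 1)) :
    ∀ (m : Nat) (low high : Int), (high - low).toNat = m →
      0 ≤ low → low ≤ k → k ≤ high → high ≤ 8 → goA n low high = k := by
  intro m
  induction m using Nat.strong_induction_on with
  | _ m IH =>
    intro low high hm h0 hlk hkh h8
    have hlh : low ≤ high := by omega
    have hmid := PySem.Int.floordiv_two_mid_bounds hlh
    rw [goA, dif_pos hlh]
    split_ifs with h1 h2 h3 h4 h5
    · -- number ≥ vers[high] : returns high; then k = high
      by_contra hne
      have hklt : k + 1 ≤ high := by omega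
      have := vatA_monoLe (by omega) hklt h8
      omega
    · -- number ≤ vers[low] : returns low; then k = low
      by_contra hne
      have : low < k := lt_of_le_of_ne hlk (by omega)
      exact absurd (vatA_mono h0 this (by omega)) (by omega)
    · -- number ≤ vers[mid] : high -= 1
      have hkh' : k < high := by
        by_contra hc
        have hk8 : k = high := by omega
        rw [hk8] at hbk
        omega
      exact IH (high - 1 - low).toNat (by omega) low (high - 1) rfl h0 hlk (by omega) (by omega)
    · -- number ≥ vers[mid+1] : low += 1
      have hmh : PySem.Int.floordiv (low + high) 2 < high := by
        by_contra hc
        have hme : PySem.Int.floordiv (low + high) 2 = high := by omega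
        rw [hme] at h3
        omega
      have hk : PySem.Int.floordiv (low + high) 2 + 1 ≤ k := by
        by_contra hc
        have : k + 1 ≤ PySem.Int.floordiv (low + high) 2 + 1 := by omega
        have := vatA_monoLe (by omega) this (by omega)
        omega
      exact IH (high - (low + 1)).toNat (by omega) (low + 1) high rfl (by omega) (by omega) hkh h8
    · -- vers[mid] ≤ number < vers[mid+1] : returns mid; then k = mid
      obtain ⟨hm1, hm2⟩ := h5
      by_contra hne
      rcases lt_or_gt_of_ne (Ne.symm hne) with hlt | hgt
      · have := vatA_monoLe (by omega) (by omega : k + 1 ≤ PySem.Int.floordiv (low + high) 2) (by omega)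
        omega
      · have := vatA_monoLe (by omega) (by omega : PySem.Int.floordiv (low + high) 2 + 1 ≤ k) (by omega)
        omega
    · -- unreachable else: the previous two negations force the bucket condition
      exact absurd ⟨by omega, by omega⟩ h5

-- B's loop returns k when the bucket index k lies in [lo, hi]
theorem goB_correct (n k : Int) (hk0 : 0 ≤ k) (hk7 : k ≤ 7)
    (hbk : vatA k ≤ n) (hbk1 : n < vatA (k + 1)) :
    ∀ (m : Nat) (lo hi : Int), (hi - lo).toNat = m →
      0 ≤ lo → lo ≤ k → k ≤ hi → hi ≤ 7 → goB n lo hi = k := by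
  intro m
  induction m using Nat.strong_induction_on with
  | _ m IH =>
    intro lo hi hm h0 hlk hkh h7
    have hlh : lo ≤ hi := by omega
    have hmid := PySem.Int.floordiv_two_mid_bounds hlh
    rw [goB, dif_pos hlh]
    simp only [vatB_eq_vatA]
    split_ifs with h1 h2
    · -- bucket found at mid; then k = mid
      obtain ⟨hm1, hm2⟩ := h1
      by_contra hne
      rcases lt_or_gt_of_ne (Ne.symm hne) with hlt | hgt
      · have := vatA_monoLe (by omega) (by omega : k + 1 ≤ PySem.Int.floordiv (lo + hi) 2) (by omega)
        omega
      · have := vatA_monoLe (by omega) (by omega : PySem.Int.floordiv (lo + hi) 2 + 1 ≤ k) (by omega)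
        omega
    · -- number < vers[mid] : hi = mid - 1
      have hk : k ≤ PySem.Int.floordiv (lo + hi) 2 - 1 := by
        by_contra hc
        have := vatA_monoLe (by omega) (by omega : PySem.Int.floordiv (lo + hi) 2 ≤ k) (by omega)
        omega
      exact IH (PySem.Int.floordiv (lo + hi) 2 - 1 - lo).toNat (by omega) lo _ rfl h0 hlk hk (by omega)
    · -- number ≥ vers[mid] and not the bucket: lo = mid + 1
      have hge : vatA (PySem.Int.floordiv (lo + hi) 2) ≤ n := by omega
      have hlt1 : vatA (PySem.Int.floordiv (lo + hi) 2 + 1) ≤ n := by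
        by_contra hc
        exact h1 ⟨hge, by omega⟩
      have hk : PySem.Int.floordiv (lo + hi) 2 + 1 ≤ k := by
        by_contra hc
        have := vatA_monoLe (by omega) (by omega : k + 1 ≤ PySem.Int.floordiv (lo + hi) 2 + 1) (by omega)
        omega
      exact IH (hi - (PySem.Int.floordiv (lo + hi) 2 + 1)).toNat (by omega) _ hi rfl (by omega) hk hkh h7

-- between the two boundary values there is a bucket index
theorem bucket_exists (n : Int) (hlo : vatA 0 < n) (hhi : n < vatA 8) :
    ∃ k : Int, 0 ≤ k ∧ k ≤ 7 ∧ vatA k ≤ n ∧ n < vatA (k + 1) := by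
  obtain ⟨e0, e1, e2, e3, e4, e5, e6, e7, e8, e9⟩ := vatA_eval
  by_cases c1 : n < 378675
  · exact ⟨0, by omega, by omega, by omega, by norm_num; omega⟩
  by_cases c2 : n < 379893
  · exact ⟨1, by omega, by omega, by omega, by norm_num; omega⟩
  by_cases c3 : n < 393295
  · exact ⟨2, by omega, by omega, by omega, by norm_num; omega⟩
  by_cases c4 : n < 394254
  · exact ⟨3, by omega, by omega, by omega, by norm_num; omega⟩
  by_cases c5 : n < 394802
  · exact ⟨4, by omega, by omega, by omega, by norm_num; omega⟩
  by_cases c6 : n < 460798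
  · exact ⟨5, by omega, by omega, by omega, by norm_num; omega⟩
  by_cases c7 : n < 461308
  · exact ⟨6, by omega, by omega, by omega, by norm_num; omega⟩
  · exact ⟨7, by omega, by omega, by omega, by norm_num; omega⟩

-- ===== VERDICT (by name: the statement is the Claim_ definition above) =====
theorem GetCorrectVersion_spec : Claim_equal_GetCorrectVersion := by
  intro n _
  unfold Spec_GetCorrectVersion GetCorrectVersion GetCorrectVersion_alt
  obtain ⟨e0, e1, e2, e3, e4, e5, e6, e7, e8, e9⟩ := vatA_eval
  rw [show ((versA.length : Int) - 1) = 8 from by decide,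
      show ((versB.length : Int) - 1) = 8 from by decide,
      show ((versB.length : Int) - 2) = 7 from by decide]
  simp only [vatB_eq_vatA]
  by_cases htop : n ≥ vatA (-1)
  · rw [if_pos htop, goA, dif_pos (by norm_num : (0:Int) ≤ 8), if_pos (by omega : n ≥ vatA 8)]
  · rw [if_neg htop]
    by_cases hbot : n ≤ vatA 0
    · rw [if_pos hbot, goA, dif_pos (by norm_num : (0:Int) ≤ 8),
          if_neg (by omega : ¬ n ≥ vatA 8), if_pos hbot]
    · rw [if_neg hbot]
      obtain ⟨k, hk0, hk7, hbk, hbk1⟩ := bucket_exists n (by omega) (by omega)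
      rw [goA_correct n k hk0 hk7 hbk hbk1 8 0 8 (by decide) (by omega) hk0 (by omega) (by omega),
          goB_correct n k hk0 hk7 hbk hbk1 7 0 7 (by decide) (by omega) hk0 (by omega) (by omega)]
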